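-- pv_equiv track=rewrite | github.com/adhithyan15/coding-adventures | code/packages/python/aztec-code/src/aztec_code/__init__.py | _stuff_bits
-- ===== SOURCE A (Python) =====
-- def _stuff_bits(bits: list[int]) -> list[int]:
--     """Apply Aztec bit stuffing to the data+ECC bit stream.
--
--     Inserts a complement bit after every run of 4 identical bits.  After
--     inserting, the run resets so the inserted complement counts as the new
--     run-of-1.
--     """
--     stuffed: list[int] = []
--     run_val = -1
--     run_len = 0
--
--     for bit in bits:
--         if bit == run_val:
--             run_len += 1
--         else:
--             run_val = bit
--             run_len = 1
--
--         stuffed.append(bit)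
--
--         if run_len == 4:
--             stuff_bit = 1 - bit
--             stuffed.append(stuff_bit)
--             run_val = stuff_bit
--             run_len = 1
--
--     return stuffed
-- ===== SOURCE B (Python) =====
-- def _stuff_bits(bits: list[int]) -> list[int]:
--     """Aztec bit stuffing, staged: run-length encode the input, then emit each
--     run in closed form (arithmetic gives the number and positions of the
--     inserted complements), carrying the run credit between runs."""
--     # stage 1: run-length encode the input into (value, length) pairs
--     runs: list[list[int]] = []
--     for b in bits:
--         if runs and runs[-1][0] == b:
--             runs[-1][1] += 1
--         else:
--             runs.append([b, 1])
--     # stage 2: emit each run as whole blocks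
--     out: list[int] = []
--     pv, pc = -1, 0  # carried run value / credit (0..3)
--     for v, length in runs:
--         start = pc if v == pv else 0
--         s = (start + length) // 4   # number of complements inserted in this run
--         r = (start + length) % 4
--         if s == 0:
--             out += [v] * length
--             pv, pc = v, start + length
--         else:
--             out += [v] * (4 - start) + [1 - v]
--             out += ([v] * 4 + [1 - v]) * (s - 1)
--             out += [v] * r
--             pv, pc = (v, r) if r > 0 else (1 - v, 1)
--     return out
-- ===== Notes on version B (the rewrite author's own statement) =====
-- stated objective: alternative
-- what changed: Replaces A's bit-at-a-time loop with two stages: a run-length encoding pass, then a per-run closed-form emission that computes the number of inserted complements arithmetically ((carry+len)//4) and appends whole replicated blocks, carrying the run credit between runs.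
import Mathlib
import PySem

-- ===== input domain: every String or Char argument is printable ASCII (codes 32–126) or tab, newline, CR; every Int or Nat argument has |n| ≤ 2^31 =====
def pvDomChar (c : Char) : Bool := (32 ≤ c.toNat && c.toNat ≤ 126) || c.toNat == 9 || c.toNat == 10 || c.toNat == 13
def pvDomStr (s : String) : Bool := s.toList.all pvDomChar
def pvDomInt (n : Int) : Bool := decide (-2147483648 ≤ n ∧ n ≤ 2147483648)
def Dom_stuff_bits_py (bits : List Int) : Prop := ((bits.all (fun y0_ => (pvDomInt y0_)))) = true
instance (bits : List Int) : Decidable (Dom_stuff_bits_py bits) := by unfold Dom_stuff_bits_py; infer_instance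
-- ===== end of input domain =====

-- B replaces A's bit-at-a-time counter loop with two stages: run-length encode the
-- input, then emit each run in closed form (the number of inserted complements is
-- (carry+len)//4), carrying the run credit between runs (objective: alternative).

-- ===== PORT A =====
-- one loop iteration of A: update (run_val, run_len), append the bit, stuff on a run of 4
def stuffStepA (st : List Int × Int × Int) (bit : Int) : List Int × Int × Int :=
  let stuffed := st.1
  let run_val := st.2.1
  let run_len := st.2.2
  let rv : Int × Int := if bit == run_val then (run_val, run_len + 1) else (bit, 1)
  let stuffed := stuffed ++ [bit]
  if rv.2 == 4 then (stuffed ++ [1 - bit], 1 - bit, 1) else (stuffed, rv.1, rv.2)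

def stuff_bits_py (bits : List Int) : List Int :=
  (bits.foldl stuffStepA ([], -1, 0)).1

-- ===== PORT B =====
-- Source B stage 1, one iteration: bump the last run's count or open a new run
def rleStep (runs : List (Int × Int)) (b : Int) : List (Int × Int) :=
  match runs.getLast? with
  | some (v, c) => if v == b then runs.dropLast ++ [(v, c + 1)] else runs ++ [(b, 1)]
  | none => [(b, 1)]

-- Source B stage 2, one iteration: emit one run as whole blocks from state (out, pv, pc)
def emitRun (st : List Int × Int × Int) (run : Int × Int) : List Int × Int × Int :=
  let out := st.1
  let pv := st.2.1
  let pc := st.2.2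
  let v := run.1
  let len := run.2
  let start := if v == pv then pc else 0
  let s := PySem.Int.floordiv (start + len) 4
  let r := PySem.Int.mod (start + len) 4
  if s == 0 then
    (out ++ List.replicate len.toNat v, v, start + len)
  else
    (out ++ List.replicate (4 - start).toNat v ++ [1 - v]
         ++ (List.replicate (s - 1).toNat (List.replicate 4 v ++ [1 - v])).flatten
         ++ List.replicate r.toNat v,
     if r > 0 then (v, r) else (1 - v, 1))

def stuff_bits_py_alt (bits : List Int) : List Int :=
  ((bits.foldl rleStep []).foldl emitRun ([], -1, 0)).1

-- ===== PRECONDITION & SPEC =====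
def Spec_stuff_bits_py (bits : List Int) (out : List Int) : Prop := out = stuff_bits_py_alt bits
instance (bits : List Int) (out : List Int) : Decidable (Spec_stuff_bits_py bits out) := by unfold Spec_stuff_bits_py; infer_instance

-- ===== CLAIM (what is proved, stated in full; the proofs are below) =====
def Claim_equal_stuff_bits_py : Prop := ∀ (bits : List Int), Dom_stuff_bits_py bits → Spec_stuff_bits_py bits (stuff_bits_py bits)

-- ===== LEMMAS AND PROOFS =====

-- expansion of a run list back into a bit list
def expand (runs : List (Int × Int)) : List Int :=
  runs.flatMap (fun p => List.replicate p.2.toNat p.1)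

-- every run has positive length
def AllPos (runs : List (Int × Int)) : Prop := ∀ p ∈ runs, 1 ≤ p.2

-- what A appends while consuming a run of L copies of v entered with credit n
def blkB (v : Int) : List Int := List.replicate 4 v ++ [1 - v]

def bodyN (v : Int) (n L : Nat) : List Int :=
  if n + L < 4 then List.replicate L v
  else List.replicate (4 - n) v ++ [1 - v]
       ++ (List.replicate ((n + L) / 4 - 1) (blkB v)).flatten
       ++ List.replicate ((n + L) % 4) v

lemma rleStep_expand (runs : List (Int × Int)) (b : Int) (h : AllPos runs) :
    AllPos (rleStep runs b) ∧ expand (rleStep runs b) = expand runs ++ [b] := by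
  rcases List.eq_nil_or_concat runs with hnil | ⟨l', ⟨v, c⟩, rfl⟩
  · subst hnil
    constructor
    · intro p hp; simp [rleStep] at hp; subst hp; norm_num
    · simp [rleStep, expand]
  · simp only [List.concat_eq_append] at h ⊢
    have hc : 1 ≤ c := h (v, c) (by simp)
    by_cases hvb : v = b
    · subst hvb
      have hstep : rleStep (l' ++ [(v, c)]) v = l' ++ [(v, c + 1)] := by
        simp [rleStep]
      rw [hstep]
      constructor
      · intro p hp
        rcases List.mem_append.mp hp with h1 | h2
        · exact h p (List.mem_append.mpr (Or.inl h1))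
        · simp at h2; subst h2; simp; omega
      · have htn : (c + 1).toNat = c.toNat + 1 := by omega
        simp [expand, htn, List.replicate_succ']
    · have hstep : rleStep (l' ++ [(v, c)]) b = (l' ++ [(v, c)]) ++ [(b, 1)] := by
        have : (v == b) = false := beq_eq_false_iff_ne.mpr hvb
        simp [rleStep, this]
      rw [hstep]
      constructor
      · intro p hp
        rcases List.mem_append.mp hp with h1 | h2
        · exact h p h1
        · simp at h2; subst h2; norm_num
      · simp [expand]

lemma rle_expand (bits : List (Int)) :
    ∀ runs, AllPos runs →
      AllPos (bits.foldl rleStep runs) ∧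
      expand (bits.foldl rleStep runs) = expand runs ++ bits := by
  induction bits with
  | nil => intro runs h; exact ⟨h, by simp⟩
  | cons b rest ih =>
    intro runs h
    obtain ⟨h1, h2⟩ := rleStep_expand runs b h
    obtain ⟨h3, h4⟩ := ih (rleStep runs b) h1
    exact ⟨h3, by rw [List.foldl_cons] at *; rw [h4, h2]; simp⟩

-- one A-step on a bit equal to v from a state with effective credit n
lemma entryA (s : List Int) (pv pc v : Int) (n : Nat)
    (h : (pv = v ∧ n ≤ 3 ∧ pc = (n : Int)) ∨ (pv ≠ v ∧ n = 0)) :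
    stuffStepA (s, pv, pc) v =
      if n + 1 = 4 then (s ++ [v, 1 - v], 1 - v, 1) else (s ++ [v], v, (n : Int) + 1) := by
  rcases h with ⟨hpv, hn, hpc⟩ | ⟨hpv, hn⟩
  · subst hpv hpc
    by_cases h4 : n + 1 = 4
    · have : n = 3 := by omega
      subst this
      simp [stuffStepA, h4]
    · have : ((n : Int) + 1 == 4) = false := by
        apply beq_eq_false_iff_ne.mpr; omega
      simp [stuffStepA, h4, this]
  · subst hn
    have hb : (v == pv) = false := beq_eq_false_iff_ne.mpr (Ne.symm hpv)
    simp [stuffStepA, hb]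

lemma core (L : Nat) :
    ∀ (s : List Int) (pv pc v : Int) (n : Nat),
      ((pv = v ∧ n ≤ 3 ∧ pc = (n : Int)) ∨ (pv ≠ v ∧ n = 0)) → 1 ≤ L →
      List.foldl stuffStepA (s, pv, pc) (List.replicate L v)
        = (s ++ bodyN v n L,
           if (n + L) % 4 = 0 then (1 - v, 1) else (v, (((n + L) % 4 : Nat) : Int))) := by
  induction L with
  | zero => intro _ _ _ _ _ _ habs; omega
  | succ L' ih =>
    intro s pv pc v n h hL
    rw [List.replicate_succ, List.foldl_cons, entryA s pv pc v n h]
    by_cases h4 : n + 1 = 4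
    · have hn3 : n = 3 := by omega
      subst hn3
      rw [if_pos h4]
      rcases Nat.eq_zero_or_pos L' with hL0 | hL1
      · subst hL0
        simp only [List.replicate_zero, List.foldl_nil]
        have hmod : (3 + 1) % 4 = 0 := by norm_num
        rw [hmod]
        simp [bodyN, blkB]
      · have hne : (1 : Int) - v ≠ v := by omega
        rw [ih (s ++ [v, 1 - v]) (1 - v) 1 v 0 (Or.inr ⟨hne, rfl⟩) hL1]
        rw [Prod.mk.injEq]
        refine ⟨?_, ?_⟩
        · -- list part: bodyN v 3 (L'+1) = [v, 1-v] ++ bodyN v 0 L'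
          show s ++ [v, 1 - v] ++ bodyN v 0 L' = s ++ bodyN v 3 (L' + 1)
          rw [List.append_assoc]
          congr 1
          unfold bodyN
          simp only [Nat.zero_add, Nat.sub_zero]
          by_cases hsmall : L' < 4
          · have hc1 : ¬ (3 + (L' + 1) < 4) := by omega
            have hq : (3 + (L' + 1)) / 4 - 1 = 0 := by omega
            have hr : (3 + (L' + 1)) % 4 = L' := by omega
            rw [if_pos hsmall, if_neg hc1, hq, hr]
            simp
          · have hc1 : ¬ (3 + (L' + 1) < 4) := by omega
            have hq : (3 + (L' + 1)) / 4 - 1 = L' / 4 := by omega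
            have hq3 : 1 ≤ L' / 4 := by omega
            rw [if_neg hsmall, if_neg hc1, hq]
            have hrep : List.replicate (L' / 4) (blkB v)
                = blkB v :: List.replicate (L' / 4 - 1) (blkB v) := by
              rw [← List.replicate_succ]
              congr 1
              omega
            have hmod : (3 + (L' + 1)) % 4 = L' % 4 := by omega
            rw [hmod, hrep]
            simp [blkB, List.replicate_succ]
        · -- state part
          have hmod : (3 + (L' + 1)) % 4 = (0 + L') % 4 := by omega
          rw [hmod]
    · rw [if_neg h4]
      rcases Nat.eq_zero_or_pos L' with hL0 | hL1
      · subst hL0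
        simp only [List.replicate_zero, List.foldl_nil]
        have hmod : (n + 1) % 4 = n + 1 := by omega
        have hne : ¬ ((n + 1) % 4 = 0) := by omega
        rw [if_neg hne]
        rw [Prod.mk.injEq]
        refine ⟨?_, ?_⟩
        · show s ++ [v] = s ++ bodyN v n 1
          congr 1
          unfold bodyN
          rw [if_pos (by omega)]
          simp
        · rw [hmod]
          rw [Prod.mk.injEq]
          exact ⟨rfl, by push_cast; ring⟩
      · have hle : n + 1 ≤ 3 := by omega
        rw [ih (s ++ [v]) v ((n : Int) + 1) v (n + 1)
            (Or.inl ⟨rfl, hle, by push_cast; ring⟩) hL1]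
        rw [Prod.mk.injEq]
        refine ⟨?_, ?_⟩
        · show s ++ [v] ++ bodyN v (n + 1) L' = s ++ bodyN v n (L' + 1)
          rw [List.append_assoc]
          congr 1
          unfold bodyN
          by_cases hsmall : n + 1 + L' < 4
          · rw [if_pos hsmall, if_pos (by omega)]
            simp [List.replicate_succ]
          · have hc1 : ¬ (n + (L' + 1) < 4) := by omega
            rw [if_neg hsmall, if_neg hc1]
            have hrep : List.replicate (4 - n) v = v :: List.replicate (4 - (n + 1)) v := by
              rw [← List.replicate_succ]
              congr 1
              omega
            have hq : (n + 1 + L') / 4 = (n + (L' + 1)) / 4 := by omega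
            have hr : (n + 1 + L') % 4 = (n + (L' + 1)) % 4 := by omega
            rw [hrep, hq, hr]
            simp
        · have hmod : (n + 1 + L') % 4 = (n + (L' + 1)) % 4 := by omega
          rw [hmod]

-- emitRun in terms of the proof-side closed form bodyN
lemma emitRun_eq (out : List Int) (pv pc v len : Int) (n : Nat)
    (hpc0 : 0 ≤ pc) (hlen : 1 ≤ len)
    (hn : n = if pv = v then pc.toNat else 0) :
    emitRun (out, pv, pc) (v, len)
      = (out ++ bodyN v n len.toNat,
         if (n + len.toNat) % 4 = 0 then (1 - v, 1) else (v, (((n + len.toNat) % 4 : Nat) : Int))) := by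
  have hstart : (if v == pv then pc else 0) = (n : Int) := by
    by_cases hpv : pv = v
    · subst hn; simp [hpv]; omega
    · have hb : (v == pv) = false := beq_eq_false_iff_ne.mpr (Ne.symm hpv)
      subst hn; simp [hb, hpv]
  have hsum : (n : Int) + len = ((n + len.toNat : Nat) : Int) := by push_cast; omega
  have hfd : PySem.Int.floordiv ((n : Int) + len) 4 = (((n + len.toNat) / 4 : Nat) : Int) := by
    rw [PySem.Int.floordiv_eq_ediv_of_pos (by norm_num), hsum]
    exact_mod_cast Int.natCast_ediv (n + len.toNat) 4
  have hmd : PySem.Int.mod ((n : Int) + len) 4 = (((n + len.toNat) % 4 : Nat) : Int) := by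
    rw [PySem.Int.mod_eq_emod_of_pos (by norm_num), hsum]
    exact_mod_cast Int.natCast_emod (n + len.toNat) 4
  show (let start := if v == pv then pc else 0
        let s := PySem.Int.floordiv (start + len) 4
        let r := PySem.Int.mod (start + len) 4
        if s == 0 then
          (out ++ List.replicate len.toNat v, v, start + len)
        else
          (out ++ List.replicate (4 - start).toNat v ++ [1 - v]
               ++ (List.replicate (s - 1).toNat (List.replicate 4 v ++ [1 - v])).flatten
               ++ List.replicate r.toNat v,
           if r > 0 then (v, r) else (1 - v, 1))) = _
  rw [hstart]
  simp only [hfd, hmd]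
  by_cases hq : (n + len.toNat) / 4 = 0
  · have hsmall : n + len.toNat < 4 := by omega
    rw [if_pos (by simp only [beq_iff_eq, Int.natCast_eq_zero]; exact hq)]
    have hmodeq : (n + len.toNat) % 4 = n + len.toNat := by omega
    rw [if_neg (by omega), Prod.mk.injEq]
    refine ⟨?_, ?_⟩
    · congr 1
      unfold bodyN
      rw [if_pos hsmall]
    · rw [Prod.mk.injEq]
      exact ⟨rfl, by rw [hmodeq]; push_cast; omega⟩
  · rw [if_neg (by simp only [beq_iff_eq, Int.natCast_eq_zero]; exact hq)]
    have hbig : ¬ (n + len.toNat < 4) := by omega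
    have e1 : ((4 : Int) - (n : Int)).toNat = 4 - n := by omega
    have e2 : ((((n + len.toNat) / 4 : Nat) : Int) - 1).toNat = (n + len.toNat) / 4 - 1 := by omega
    have e3 : ((((n + len.toNat) % 4 : Nat) : Int)).toNat = (n + len.toNat) % 4 := by omega
    rw [Prod.mk.injEq]
    refine ⟨?_, ?_⟩
    · rw [e1, e2, e3]
      unfold bodyN blkB
      rw [if_neg hbig]
      simp [List.append_assoc]
    · by_cases hr : (n + len.toNat) % 4 = 0
      · rw [if_pos hr, if_neg (by simp [hr])]
      · rw [if_neg hr, if_pos (by exact_mod_cast Nat.pos_of_ne_zero hr)]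

-- emitRun computes exactly what A's loop does across one whole run
lemma perRun (out : List Int) (pv pc v len : Int)
    (hpc0 : 0 ≤ pc) (hpc3 : pc ≤ 3) (hlen : 1 ≤ len) :
    List.foldl stuffStepA (out, pv, pc) (List.replicate len.toNat v)
      = emitRun (out, pv, pc) (v, len) := by
  set n : Nat := if pv = v then pc.toNat else 0 with hn
  have hh : (pv = v ∧ n ≤ 3 ∧ pc = (n : Int)) ∨ (pv ≠ v ∧ n = 0) := by
    by_cases hpv : pv = v
    · left; refine ⟨hpv, ?_, ?_⟩ <;> simp [hn, hpv] <;> omega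
    · right; simp [hn, hpv]
  rw [core len.toNat out pv pc v n hh (by omega),
      emitRun_eq out pv pc v len n hpc0 hlen hn]

-- the carried credit stays in [0, 3]
lemma emitRun_pc (st : List Int × Int × Int) (run : Int × Int)
    (hpc0 : 0 ≤ st.2.2) (hpc3 : st.2.2 ≤ 3) (hlen : 1 ≤ run.2) :
    0 ≤ (emitRun st run).2.2 ∧ (emitRun st run).2.2 ≤ 3 := by
  obtain ⟨out, pv, pc⟩ := st
  obtain ⟨v, len⟩ := run
  simp only at hpc0 hpc3 hlen
  rw [emitRun_eq out pv pc v len (if pv = v then pc.toNat else 0) hpc0 hlen rfl]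
  split_ifs <;> refine ⟨?_, ?_⟩ <;> simp <;> omega

-- folding A's step over the expansion = folding B's run emitter over the runs
lemma runsFold (runs : List (Int × Int)) :
    ∀ (st : List Int × Int × Int), 0 ≤ st.2.2 → st.2.2 ≤ 3 → AllPos runs →
      List.foldl stuffStepA st (expand runs) = List.foldl emitRun st runs := by
  induction runs with
  | nil => intro st _ _ _; rfl
  | cons run rest ih =>
    intro st h0 h3 hpos
    obtain ⟨out, pv, pc⟩ := st
    obtain ⟨v, len⟩ := run
    have hlen : 1 ≤ len := hpos (v, len) (by simp)
    have hexp : expand ((v, len) :: rest) = List.replicate len.toNat v ++ expand rest := by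
      simp [expand]
    rw [hexp, List.foldl_append, List.foldl_cons,
        perRun out pv pc v len h0 h3 hlen]
    have hbound := emitRun_pc (out, pv, pc) (v, len) h0 h3 hlen
    exact ih _ hbound.1 hbound.2 (fun p hp => hpos p (by simp [hp]))

-- ===== VERDICT (by name: the statement is the Claim_ definition above) =====
theorem stuff_bits_py_spec : Claim_equal_stuff_bits_py := by
  intro bits _
  unfold Spec_stuff_bits_py stuff_bits_py stuff_bits_py_alt
  obtain ⟨hpos, hexp⟩ := rle_expand bits [] (by intro p hp; simp at hp)
  have hbits : expand (bits.foldl rleStep []) = bits := by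
    rw [hexp]; simp [expand]
  calc (List.foldl stuffStepA ([], -1, 0) bits).1
      = (List.foldl stuffStepA ([], -1, 0) (expand (bits.foldl rleStep []))).1 := by rw [hbits]
    _ = (List.foldl emitRun ([], -1, 0) (bits.foldl rleStep [])).1 := by
        rw [runsFold (bits.foldl rleStep []) ([], -1, 0) (by norm_num) (by norm_num) hpos]
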